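-- pv_equiv track=rewrite | github.com/rpinnola47/PYTHON | TP 6 Fdla/EJERCICIO 12.py | extraerdigito
-- ===== SOURCE A (Python) =====
-- def extraerdigito(a,b):
--     digito=0
--     for i in range(0,(b+1)):
--         resto=a%10
--         numeroresto=a//10
--         a=numeroresto
--         digito=resto
--     if digito==0 and a==0:
--         digito=-1
--     return digito
-- ===== SOURCE B (Python) =====
-- def extraerdigito(a, b):
--     q = a // 10 ** b
--     return q % 10 if q else -1
-- ===== Notes on version B (the rewrite author's own statement) =====
-- stated objective: simpler
-- what changed: Replaces A's loop of b+1 repeated floor divisions by the closed form q = a // 10**b with q % 10, returning -1 when q is zero; Pre_ excludes b < 0, where A's 0/-1 is leftover state of an empty loop and B's 10**b is a float so B returns a non-integer.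
-- outside the precondition, e.g. on extraerdigito(5, -1): A returns 0, B returns 9.0; on extraerdigito(0, -1): A returns -1, B returns -1
import Mathlib
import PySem

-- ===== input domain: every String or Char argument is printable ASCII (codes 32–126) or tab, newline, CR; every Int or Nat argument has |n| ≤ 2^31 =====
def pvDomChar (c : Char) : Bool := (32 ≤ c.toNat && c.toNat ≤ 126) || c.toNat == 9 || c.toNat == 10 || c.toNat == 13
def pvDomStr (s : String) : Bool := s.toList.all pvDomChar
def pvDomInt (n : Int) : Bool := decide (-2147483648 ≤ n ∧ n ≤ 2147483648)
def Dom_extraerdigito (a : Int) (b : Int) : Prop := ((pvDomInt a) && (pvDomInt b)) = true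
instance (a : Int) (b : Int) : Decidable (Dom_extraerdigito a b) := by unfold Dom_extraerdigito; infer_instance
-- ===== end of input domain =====

-- B replaces A's b+1 floor-division steps by the closed form (a // 10**b) % 10 (objective: simpler — two lines, no loop state).

-- ===== PORT A =====
-- literal port of A's loop: state (a, digito), one step per element of range(0, b+1)
def extraerdigito (a : Int) (b : Int) : Int :=
  let st := (PySem.List.pyRange 0 (b + 1) 1).foldl
    (fun (s : Int × Int) (_ : Int) =>
      let resto := PySem.Int.mod s.1 10
      let numeroresto := PySem.Int.floordiv s.1 10
      (numeroresto, resto)) (a, 0)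
  if st.2 = 0 ∧ st.1 = 0 then -1 else st.2

-- ===== PORT B =====
-- q = a // 10 ** b; return q % 10 if q else -1   (10 ** b with b ≥ 0 is the integer 10 ^ b.toNat)
def extraerdigito_alt (a : Int) (b : Int) : Int :=
  let q := PySem.Int.floordiv a ((10 : Int) ^ b.toNat)
  if q ≠ 0 then PySem.Int.mod q 10 else -1

-- ===== PRECONDITION & SPEC =====
-- Pre_ excludes b < 0: there A's 0/-1 is leftover state of an empty loop, while B's 10**b is a
-- Python float, so B returns a non-integer value outside the declared return type.
def Pre_extraerdigito (a : Int) (b : Int) : Prop := 0 ≤ b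
instance (a : Int) (b : Int) : Decidable (Pre_extraerdigito a b) := by unfold Pre_extraerdigito; infer_instance
def pvWitness_extraerdigito : Int × Int := (354, 1)

def Spec_extraerdigito (a : Int) (b : Int) (out : Int) : Prop := out = extraerdigito_alt a b
instance (a : Int) (b : Int) (out : Int) : Decidable (Spec_extraerdigito a b out) := by unfold Spec_extraerdigito; infer_instance

-- ===== CLAIM (what is proved, stated in full; the proofs are below) =====
def Claim_equal_extraerdigito : Prop := ∀ (a : Int) (b : Int), Dom_extraerdigito a b → Pre_extraerdigito a b → Spec_extraerdigito a b (extraerdigito a b)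

-- ===== LEMMAS AND PROOFS =====

-- A's loop body ignores the loop variable, so the fold over any list of length n+1
-- yields the closed form (a / 10^(n+1), (a / 10^n) % 10).
theorem pv_loop_closed (l : List Int) (a d : Int) :
    l.foldl (fun (s : Int × Int) (_ : Int) =>
        (PySem.Int.floordiv s.1 10, PySem.Int.mod s.1 10)) (a, d) =
      if h : l.length = 0 then (a, d)
      else (a / (10 : Int) ^ l.length, (a / (10 : Int) ^ (l.length - 1)) % 10) := by
  induction l generalizing a d with
  | nil => simp
  | cons x xs ih =>
    simp only [List.foldl_cons, List.length_cons]
    rw [ih]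
    rw [PySem.Int.floordiv_eq_ediv_of_pos (by norm_num), PySem.Int.mod_eq_emod_of_pos (by norm_num)]
    by_cases h : xs.length = 0
    · simp [h]
    · simp only [h, Nat.add_one_ne_zero, Nat.add_sub_cancel, dite_false]
      obtain ⟨m, hm⟩ := Nat.exists_eq_succ_of_ne_zero h
      rw [hm]
      simp only [Nat.succ_eq_add_one, Nat.add_sub_cancel]
      rw [Int.ediv_ediv_of_nonneg (by positivity), Int.ediv_ediv_of_nonneg (by positivity),
          show (10:Int) * 10 ^ (m + 1) = 10 ^ (m + 1 + 1) by ring,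
          show (10:Int) * 10 ^ m = 10 ^ (m + 1) by ring]

-- ===== VERDICT (by name: the statement is the Claim_ definition above) =====
theorem extraerdigito_spec : Claim_equal_extraerdigito := by
  intro a b _ hb
  have hb' : 0 ≤ b := hb
  simp only [Spec_extraerdigito, extraerdigito, extraerdigito_alt]
  have hlen : (PySem.List.pyRange 0 (b + 1) 1).length = b.toNat + 1 := by
    rw [PySem.List.length_pyRange_one]; omega
  rw [pv_loop_closed]
  simp only [hlen, Nat.add_one_ne_zero, Nat.add_sub_cancel, dite_false]
  set n := b.toNat with hn
  have hpow : (0:Int) < 10 ^ n := by positivity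
  rw [PySem.Int.floordiv_eq_ediv_of_pos hpow, PySem.Int.mod_eq_emod_of_pos (by norm_num)]
  set q := a / 10 ^ n with hq
  have hsplit : a / 10 ^ (n + 1) = q / 10 := by
    rw [hq, Int.ediv_ediv_of_nonneg (by positivity),
        show (10:Int) ^ n * 10 = 10 ^ (n + 1) by ring]
  rw [hsplit]
  have hdm := Int.emod_add_ediv q 10
  have hmod := Int.emod_nonneg q (show (10:Int) ≠ 0 by norm_num)
  have hmodlt := Int.emod_lt_of_pos q (show (0:Int) < 10 by norm_num)
  by_cases hq0 : q = 0
  · simp [hq0]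
  · have : ¬ (q % 10 = 0 ∧ q / 10 = 0) := by
      rintro ⟨h1, h2⟩; apply hq0; omega
    rw [if_neg this, if_pos hq0]
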